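-- pv_equiv track=rewrite | github.com/RegTrieve/RegTrieve | system_regression/asr/utils.py | wav2vec_normalize_text
-- ===== SOURCE A (Python) =====
-- def wav2vec_normalize_text(s):
--     """Removing articles and punctuation, and standardizing whitespace are all typical text processing steps."""
--     import string, re
--
--
--     def white_space_fix(text):
--         return " ".join(text.split())
--
--     def remove_punc(text):
--         exclude = set(string.punctuation)
--         return "".join(ch for ch in text if ch not in exclude)
--
--     def upper(text):
--         return text.upper()
--
--     def replace_white_space(text):
--         return text.replace(" ","|")
--
--
--     return [replace_white_space(white_space_fix((remove_punc(upper(i))))) for i in s]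
-- ===== SOURCE B (Python) =====
-- def wav2vec_normalize_text(s):
--     """Single split-then-clean pass: uppercase, split on whitespace, strip
--     punctuation from each word, drop words that become empty, join with '|'."""
--     import string
--
--     punct = set(string.punctuation)
--     res = []
--     for text in s:
--         words = []
--         for w in text.upper().split():
--             cw = "".join(ch for ch in w if ch not in punct)
--             if cw:
--                 words.append(cw)
--         res.append("|".join(words))
--     return res
-- ===== Notes on version B (the rewrite author's own statement) =====
-- stated objective: faster
-- what changed: Replaces A's four sequential whole-string passes (strip punctuation via a generator join, split/rejoin with spaces, then replace spaces by '|') with one split-then-clean pass that strips punctuation per word, drops words that become empty, and joins with '|' directly.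
import Mathlib
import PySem

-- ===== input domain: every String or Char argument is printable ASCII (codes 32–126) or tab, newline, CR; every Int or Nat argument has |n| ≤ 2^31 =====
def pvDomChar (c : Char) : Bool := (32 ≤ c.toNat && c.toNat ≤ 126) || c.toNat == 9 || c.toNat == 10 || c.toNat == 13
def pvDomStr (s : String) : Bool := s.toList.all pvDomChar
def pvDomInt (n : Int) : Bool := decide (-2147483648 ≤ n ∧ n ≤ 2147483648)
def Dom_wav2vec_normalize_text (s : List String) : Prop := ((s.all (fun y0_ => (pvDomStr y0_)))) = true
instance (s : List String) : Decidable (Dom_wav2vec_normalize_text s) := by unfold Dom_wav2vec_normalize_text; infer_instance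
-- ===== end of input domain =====

-- B replaces A's four sequential whole-string passes (strip punctuation, split/rejoin on spaces,
-- replace spaces by '|') with one split-then-clean-per-word pass joined with '|' directly (objective: faster, measured).


-- string.punctuation
def pvPunct : List Char :=
  ['!', '"', '#', '$', '%', '&', '\'', '(', ')', '*', '+', ',', '-', '.', '/',
   ':', ';', '<', '=', '>', '?', '@', '[', '\\', ']', '^', '_', '`', '{', '|', '}', '~']

-- ===== PORT A =====
def pvA_upper (text : String) : String := PySem.Str.upper text

def pvA_removePunc (text : String) : String :=
  let exclude : PySem.Set Char := PySem.Set.ofList pvPunct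
  String.ofList (text.toList.filter (fun ch => !(exclude.contains ch)))

def pvA_whiteSpaceFix (text : String) : String :=
  PySem.Str.join " " (PySem.Str.split₀ text)

def pvA_replaceWhiteSpace (text : String) : String :=
  PySem.Str.replace text " " "|"

def wav2vec_normalize_text (s : List String) : List String :=
  s.map (fun i => pvA_replaceWhiteSpace (pvA_whiteSpaceFix (pvA_removePunc (pvA_upper i))))

-- ===== PORT B =====
def pvB_words (punct : PySem.Set Char) (text : String) : List String :=
  (PySem.Str.split₀ (PySem.Str.upper text)).foldl (fun ws w =>
    let cw := String.ofList (w.toList.filter (fun ch => !(punct.contains ch)))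
    if cw = "" then ws else ws ++ [cw]) []

def wav2vec_normalize_text_alt (s : List String) : List String :=
  let punct : PySem.Set Char := PySem.Set.ofList pvPunct
  s.foldl (fun res text => res ++ [PySem.Str.join "|" (pvB_words punct text)]) []

-- ===== PRECONDITION & SPEC =====
def Spec_wav2vec_normalize_text (s : List String) (out : List String) : Prop := out = wav2vec_normalize_text_alt s
instance (s : List String) (out : List String) : Decidable (Spec_wav2vec_normalize_text s out) := by unfold Spec_wav2vec_normalize_text; infer_instance

-- ===== CLAIM (what is proved, stated in full; the proofs are below) =====
def Claim_equal_wav2vec_normalize_text : Prop := ∀ (s : List String), Dom_wav2vec_normalize_text s → Spec_wav2vec_normalize_text s (wav2vec_normalize_text s)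

-- ===== LEMMAS AND PROOFS =====

def pvKeep (c : Char) : Bool := !((PySem.Set.ofList pvPunct : PySem.Set Char).contains c)
def pvSwap (c : Char) : Char := if c = ' ' then '|' else c

-- whitespace characters are never punctuation, so the punctuation filter keeps them
lemma pvKeep_of_isspace (c : Char) (h : PySem.Chars.isspace c = true) : pvKeep c = true := by
  unfold pvKeep
  by_contra hc
  have hmem : c ∈ pvPunct := by
    simp only [Bool.not_eq_true', Bool.not_eq_false] at hc
    simpa using (List.contains_iff_mem).mp hc
  fin_cases hmem <;> simp [PySem.Chars.isspace] at h

lemma modifyHead_id_char (l : List (List Char)) :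
    l.modifyHead (fun w => w) = l := by cases l <;> simp

-- split₀.go in terms of List.splitOnP
lemma split₀_go_eq (cs : List Char) : ∀ (cur : List Char) (acc : List (List Char)),
    PySem.Chars.split₀.go cs cur acc
      = acc.reverse ++ ((List.splitOnP PySem.Chars.isspace cs).modifyHead
          (fun w => cur.reverse ++ w)).filter (fun w => !w.isEmpty) := by
  induction cs with
  | nil =>
    intro cur acc
    by_cases h : cur = [] <;>
      simp [PySem.Chars.split₀.go, List.splitOnP_nil, h]
  | cons c rest ih =>
    intro cur acc
    by_cases hsp : PySem.Chars.isspace c = true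
    · rw [show PySem.Chars.split₀.go (c :: rest) cur acc
            = (if cur.isEmpty then PySem.Chars.split₀.go rest [] acc
               else PySem.Chars.split₀.go rest [] (cur.reverse :: acc)) by
          simp [PySem.Chars.split₀.go, hsp]]
      by_cases h : cur = []
      · subst h
        rw [if_pos List.isEmpty_nil, ih [] acc]
        simp [List.splitOnP_cons, hsp, modifyHead_id_char]
      · rw [if_neg (by simpa using h), ih [] (cur.reverse :: acc)]
        simp only [List.splitOnP_cons, hsp, if_true, List.modifyHead_cons, modifyHead_id_char,
          List.reverse_nil, List.nil_append, List.reverse_cons, List.append_assoc,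
          List.append_nil, List.filter_cons]
        rw [show ((cur.reverse : List Char).isEmpty = false) by simpa using h]
        simp
    · rw [show PySem.Chars.split₀.go (c :: rest) cur acc
            = PySem.Chars.split₀.go rest (c :: cur) acc by
          simp [PySem.Chars.split₀.go, hsp]]
      rw [ih (c :: cur) acc]
      simp only [List.splitOnP_cons, hsp, if_false, Bool.false_eq_true]
      cases hrest : List.splitOnP PySem.Chars.isspace rest with
      | nil => simp
      | cons h t => simp

lemma split₀_eq_splitOnP (cs : List Char) :
    PySem.Chars.split₀ cs
      = (List.splitOnP PySem.Chars.isspace cs).filter (fun w => !w.isEmpty) := by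
  have h := split₀_go_eq cs [] []
  simpa [PySem.Chars.split₀, modifyHead_id_char] using h

-- removing non-whitespace characters commutes with whitespace splitting
lemma splitOnP_filter (cs : List Char) :
    List.splitOnP PySem.Chars.isspace (cs.filter pvKeep)
      = (List.splitOnP PySem.Chars.isspace cs).map (fun w => w.filter pvKeep) := by
  induction cs with
  | nil => simp
  | cons c rest ih =>
    by_cases hsp : PySem.Chars.isspace c = true
    · have hk : pvKeep c = true := pvKeep_of_isspace c hsp
      simp [hk, List.splitOnP_cons, hsp, ih]
    · by_cases hk : pvKeep c = true
      · simp only [List.filter_cons, hk, if_true, List.splitOnP_cons, hsp, if_false,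
          Bool.false_eq_true, ih]
        cases hrest : List.splitOnP PySem.Chars.isspace rest with
        | nil => simp
        | cons h t => simp [hk]
      · simp only [List.filter_cons, hk, Bool.false_eq_true, if_false, List.splitOnP_cons,
          hsp, ih]
        cases hrest : List.splitOnP PySem.Chars.isspace rest with
        | nil => simp
        | cons h t =>
          simp [hk]

-- words produced by whitespace splitting contain no whitespace
lemma splitOnP_no_space (cs : List Char) :
    ∀ w ∈ List.splitOnP PySem.Chars.isspace cs, ∀ c ∈ w, PySem.Chars.isspace c = false := by
  induction cs with
  | nil =>
    intro w hw c hc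
    rw [List.splitOnP_nil, List.mem_singleton] at hw
    subst hw; simp at hc
  | cons c rest ih =>
    intro w hw
    by_cases hsp : PySem.Chars.isspace c = true
    · rw [List.splitOnP_cons, if_pos hsp] at hw
      rcases List.mem_cons.mp hw with rfl | hw
      · intro d hd; simp at hd
      · exact ih w hw
    · rw [List.splitOnP_cons, if_neg hsp] at hw
      cases hrest : List.splitOnP PySem.Chars.isspace rest with
      | nil => rw [hrest] at hw; simp at hw
      | cons h t =>
        rw [hrest, List.modifyHead_cons] at hw
        rcases List.mem_cons.mp hw with rfl | hw
        · intro d hd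
          rcases List.mem_cons.mp hd with rfl | hd
          · simpa using hsp
          · exact ih h (by rw [hrest]; exact List.mem_cons_self ..) d hd
        · exact ih w (by rw [hrest]; exact List.mem_cons_of_mem _ hw)

-- replace with the one-character pattern " " is a character map
lemma replace_go_space (fuel : Nat) : ∀ (l : List Char) (acc : List Char), l.length ≤ fuel →
    PySem.Chars.replace.go [' '] ['|'] fuel l acc = acc.reverse ++ l.map pvSwap := by
  induction fuel with
  | zero =>
    intro l acc hl
    have : l = [] := List.eq_nil_of_length_eq_zero (Nat.le_zero.mp hl)
    subst this
    simp [PySem.Chars.replace.go]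
  | succ fuel ih =>
    intro l acc hl
    cases l with
    | nil => simp [PySem.Chars.replace.go]
    | cons c t =>
      by_cases hc : c = ' '
      · subst hc
        rw [show PySem.Chars.replace.go [' '] ['|'] (fuel + 1) (' ' :: t) acc
              = PySem.Chars.replace.go [' '] ['|'] fuel t ('|' :: acc) by
            simp [PySem.Chars.replace.go, List.isPrefixOf]]
        rw [ih t ('|' :: acc) (by simpa using Nat.lt_succ_iff.mp (by simpa using hl))]
        simp [pvSwap]
      · rw [show PySem.Chars.replace.go [' '] ['|'] (fuel + 1) (c :: t) acc
              = PySem.Chars.replace.go [' '] ['|'] fuel t (c :: acc) by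
            simp [PySem.Chars.replace.go, List.isPrefixOf, Ne.symm hc]]
        rw [ih t (c :: acc) (by simpa using Nat.lt_succ_iff.mp (by simpa using hl))]
        simp [pvSwap, hc]

lemma replace_space (cs : List Char) :
    PySem.Chars.replace cs [' '] ['|'] = cs.map pvSwap := by
  rw [show PySem.Chars.replace cs [' '] ['|']
        = PySem.Chars.replace.go [' '] ['|'] cs.length cs [] by
      simp [PySem.Chars.replace]]
  simpa using replace_go_space cs.length cs [] le_rfl

-- a character map distributes over join
lemma map_join (ws : List (List Char)) :
    (PySem.Chars.join [' '] ws).map pvSwap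
      = PySem.Chars.join ['|'] (ws.map (fun w => w.map pvSwap)) := by
  induction ws with
  | nil => simp [PySem.Chars.join_nil]
  | cons w ws ih =>
    cases ws with
    | nil => simp [PySem.Chars.join_singleton]
    | cons v rest =>
      rw [PySem.Chars.join_cons_cons, List.map_cons, List.map_cons,
        PySem.Chars.join_cons_cons, List.map_append, List.map_append, ← List.map_cons, ih]
      simp [pvSwap]

lemma map_swap_id (w : List Char) (h : ∀ c ∈ w, PySem.Chars.isspace c = false) :
    w.map pvSwap = w := by
  rw [show w.map pvSwap = w.map id by
    apply List.map_congr_left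
    intro c hc
    have : c ≠ ' ' := by
      intro he; subst he; simpa [PySem.Chars.isspace] using h ' ' hc
    simp [pvSwap, this]]
  exact List.map_id w

-- dropping empty words before or after the per-word filter is the same
lemma filter_map_filter (l : List (List Char)) :
    ((l.filter (fun w => !w.isEmpty)).map (fun w => w.filter pvKeep)).filter (fun w => !w.isEmpty)
      = (l.map (fun w => w.filter pvKeep)).filter (fun w => !w.isEmpty) := by
  induction l with
  | nil => simp
  | cons w l ih =>
    by_cases hw : w = []
    · subst hw; simpa using ih
    · simp only [List.filter_cons, List.map_cons]
      rw [show (!w.isEmpty) = true by simpa using hw]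
      simp only [if_true, List.map_cons, List.filter_cons, ih]

-- the per-string core equality, on character lists
lemma core_eq (u : List Char) :
    PySem.Chars.replace (PySem.Chars.join [' '] (PySem.Chars.split₀ (u.filter pvKeep))) [' '] ['|']
      = PySem.Chars.join ['|']
          ((((PySem.Chars.split₀ u).map (fun w => w.filter pvKeep)).filter (fun w => !w.isEmpty))) := by
  rw [split₀_eq_splitOnP, splitOnP_filter, replace_space, map_join]
  have hws : (((List.splitOnP PySem.Chars.isspace u).map (fun w => w.filter pvKeep)).filter
        (fun w => !w.isEmpty)).map (fun w => w.map pvSwap)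
      = ((List.splitOnP PySem.Chars.isspace u).map (fun w => w.filter pvKeep)).filter
        (fun w => !w.isEmpty) := by
    rw [show (((List.splitOnP PySem.Chars.isspace u).map (fun w => w.filter pvKeep)).filter
          (fun w => !w.isEmpty)).map (fun w => w.map pvSwap)
        = (((List.splitOnP PySem.Chars.isspace u).map (fun w => w.filter pvKeep)).filter
          (fun w => !w.isEmpty)).map id from ?_, List.map_id]
    apply List.map_congr_left
    intro w hw
    have hw' := List.mem_filter.mp hw |>.1
    rcases List.mem_map.mp hw' with ⟨w0, hw0, rfl⟩
    exact map_swap_id _ (fun c hc =>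
      splitOnP_no_space u w0 hw0 c (List.mem_of_mem_filter hc))
  rw [hws, split₀_eq_splitOnP, filter_map_filter]

lemma pv_toList_inj {a b : String} (h : a.toList = b.toList) : a = b := by
  have h2 := congrArg String.ofList h
  rwa [String.ofList_toList, String.ofList_toList] at h2

lemma pv_b_words (L : List String) :
    ((L.map String.toList).map (fun w => w.filter pvKeep)).filter (fun w => !w.isEmpty)
      = (L.filter (fun w => !(w.toList.filter pvKeep).isEmpty)).map
          (fun w => w.toList.filter pvKeep) := by
  simp only [List.map_map, List.filter_map]
  rfl

lemma pv_ofList_eq_empty_iff (l : List Char) : String.ofList l = "" ↔ l = [] := by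
  constructor
  · intro h
    have h2 := congrArg String.toList h
    rw [String.toList_ofList] at h2
    simpa using h2
  · intro h; subst h; decide

-- per-string equality of the two pipelines, on Strings
lemma per_string (i : String) :
    pvA_replaceWhiteSpace (pvA_whiteSpaceFix (pvA_removePunc (pvA_upper i)))
      = PySem.Str.join "|" (pvB_words (PySem.Set.ofList pvPunct) i) := by
  -- rewrite B's inner loop as map-of-filter
  have hloop : pvB_words (PySem.Set.ofList pvPunct) i
      = ((PySem.Str.split₀ (PySem.Str.upper i)).filter
          (fun w => !(w.toList.filter pvKeep).isEmpty)).map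
          (fun w => String.ofList (w.toList.filter pvKeep)) := by
    unfold pvB_words
    rw [show (fun (ws : List String) (w : String) =>
        let cw := String.ofList (w.toList.filter (fun ch =>
          !((PySem.Set.ofList pvPunct : PySem.Set Char).contains ch)))
        if cw = "" then ws else ws ++ [cw])
        = (fun ws w => if (fun w => !(w.toList.filter pvKeep).isEmpty) w = true
            then ws ++ [(fun w => String.ofList (w.toList.filter pvKeep)) w] else ws) from ?_]
    · exact (PySem.List.foldl_append_if _ _ _ []).trans (by simp)
    · funext ws w
      by_cases he : (w.toList.filter pvKeep) = []
      · show (if String.ofList (w.toList.filter pvKeep) = "" then ws else _) = _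
        rw [if_pos ((pv_ofList_eq_empty_iff _).mpr he)]
        simp [he]
      · show (if String.ofList (w.toList.filter pvKeep) = ""
            then ws else ws ++ [String.ofList (w.toList.filter pvKeep)]) = _
        rw [if_neg (fun h => he ((pv_ofList_eq_empty_iff _).mp h))]
        simp [he]
  rw [hloop]
  apply pv_toList_inj
  simp only [pvA_replaceWhiteSpace, pvA_whiteSpaceFix, pvA_removePunc, pvA_upper,
    PySem.Str.toList_replace, PySem.Str.toList_join]
  rw [show (" " : String).toList = [' '] by decide, show ("|" : String).toList = ['|'] by decide]
  rw [show (fun ch => !((PySem.Set.ofList pvPunct : PySem.Set Char).contains ch)) = pvKeep from rfl]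
  rw [PySem.Str.split₀_map_toList, String.toList_ofList, core_eq,
    ← PySem.Str.split₀_map_toList, pv_b_words]
  simp [List.map_map, Function.comp_def]

-- ===== VERDICT (by name: the statement is the Claim_ definition above) =====
theorem wav2vec_normalize_text_spec : Claim_equal_wav2vec_normalize_text := by
  unfold Claim_equal_wav2vec_normalize_text Spec_wav2vec_normalize_text
  intro s _
  unfold wav2vec_normalize_text wav2vec_normalize_text_alt
  show _ = s.foldl (fun res text =>
    res ++ [PySem.Str.join "|" (pvB_words (PySem.Set.ofList pvPunct) text)]) []
  rw [PySem.List.foldl_append_singleton_eq_map]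
  simp only [List.nil_append]
  exact List.map_congr_left (fun i _ => per_string i)
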